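-- pv_equiv track=rewrite | github.com/snyke7/aoc2022 | day15.py | get_exclusion_set_in
-- ===== SOURCE A (Python) =====
-- from typing import Tuple, List, Set
--
-- Coord = Tuple[int, int]
--
-- def get_exclusion_in(sensor: Coord, beacon: Coord, y: int) -> Tuple[int, int]:
--     dist = abs(sensor[0] - beacon[0]) + abs(sensor[1] - beacon[1])
--     remxdist = dist - abs(sensor[1] - y)
--     if remxdist < 0:
--         return sensor[0], sensor[0]
--     else:
--         return sensor[0] - remxdist, sensor[0] + remxdist + 1
--
-- def get_exclusion_set_in(conns: List[Tuple[Coord, Coord]], y: int) -> Set[int]: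
--     result = set()
--     for sensor, beacon in conns:
--         new_excls = set(range(*get_exclusion_in(sensor, beacon, y)))
--         result.update(new_excls)
--     # now remove all beacons from the result
--     for _, beacon in conns:
--         if beacon[1] == y and beacon[0] in result:
--             result.remove(beacon[0])
--     return result
-- ===== SOURCE B (Python) =====
-- def get_exclusion_set_in(conns, y):
--     # Interval-based: enumerate each excluded x exactly once, by subtracting the
--     # already-seen intervals from each sensor's exclusion interval before
--     # materializing it; then drop the x-coords of beacons lying on row y.
--     out = []
--     cover = []
--     for (sx, sy), (bx, by) in conns:
--         r = abs(sx - bx) + abs(sy - by) - abs(sy - y)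
--         lo, hi = (sx, sx) if r < 0 else (sx - r, sx + r + 1)
--         pieces = [(lo, hi)]
--         for a, b in cover:
--             pieces = [pc for p, q in pieces
--                       for pc in ((p, min(q, a)), (max(p, b), q)) if pc[0] < pc[1]]
--         for p, q in pieces:
--             out.extend(range(p, q))
--         cover.append((lo, hi))
--     bxs = {bx for _, (bx, by) in conns if by == y}
--     return {x for x in out if x not in bxs}
-- ===== Notes on version B (the rewrite author's own statement) =====
-- stated objective: alternative
-- what changed: Replaces per-sensor set unions (re-inserting every already-seen x) with interval arithmetic: each sensor's exclusion interval is clipped against all previously processed intervals and only the genuinely new x-coords are enumerated, then row-y beacon x-coords are dropped in one filtering pass.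
import Mathlib
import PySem

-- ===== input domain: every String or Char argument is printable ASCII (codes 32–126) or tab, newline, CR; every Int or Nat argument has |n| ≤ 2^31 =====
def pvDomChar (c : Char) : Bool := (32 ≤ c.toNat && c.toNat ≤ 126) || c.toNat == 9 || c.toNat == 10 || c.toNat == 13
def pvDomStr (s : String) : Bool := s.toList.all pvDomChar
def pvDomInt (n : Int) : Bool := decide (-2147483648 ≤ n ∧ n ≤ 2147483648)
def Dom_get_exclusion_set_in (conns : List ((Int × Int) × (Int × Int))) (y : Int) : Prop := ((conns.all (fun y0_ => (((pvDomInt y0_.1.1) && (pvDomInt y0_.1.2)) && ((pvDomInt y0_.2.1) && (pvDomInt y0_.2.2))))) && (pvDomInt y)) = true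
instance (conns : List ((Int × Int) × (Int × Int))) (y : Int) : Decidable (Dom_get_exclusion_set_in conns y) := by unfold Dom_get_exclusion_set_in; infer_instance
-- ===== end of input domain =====

-- B replaces A's per-sensor set unions by interval subtraction against the already-seen
-- intervals, so each excluded x-coordinate is enumerated exactly once (objective: alternative).
-- ===== PORT A =====
def get_exclusion_in (sensor : Int × Int) (beacon : Int × Int) (y : Int) : Int × Int :=
  let dist := |sensor.1 - beacon.1| + |sensor.2 - beacon.2|
  let remxdist := dist - |sensor.2 - y|
  if remxdist < 0 then (sensor.1, sensor.1)
  else (sensor.1 - remxdist, sensor.1 + remxdist + 1)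

-- body of A's first loop: result.update(set(range(*get_exclusion_in(sensor, beacon, y))))
def aUpdate (y : Int) (result : PySem.Set Int) (c : (Int × Int) × (Int × Int)) : PySem.Set Int :=
  PySem.Set.update result
    (PySem.Set.ofList (PySem.List.pyRange (get_exclusion_in c.1 c.2 y).1 (get_exclusion_in c.1 c.2 y).2 1))

-- body of A's second loop: if beacon[1] == y and beacon[0] in result: result.remove(beacon[0])
def aRemove (y : Int) (result : PySem.Set Int) (c : (Int × Int) × (Int × Int)) : PySem.Set Int :=
  if c.2.2 == y && PySem.Set.contains result c.2.1 then PySem.Set.discard result c.2.1 else result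

def get_exclusion_set_in (conns : List ((Int × Int) × (Int × Int))) (y : Int) : List Int :=
  conns.foldl (aRemove y) (conns.foldl (aUpdate y) PySem.Set.empty)

-- ===== PORT B =====
-- inner comprehension: subtract the interval ab from each piece, keeping non-empty pieces
def pySubPieces (pieces : List (Int × Int)) (ab : Int × Int) : List (Int × Int) :=
  pieces.flatMap (fun pq =>
    ([(pq.1, min pq.2 ab.1), (max pq.1 ab.2, pq.2)]).filter (fun pc => decide (pc.1 < pc.2)))

-- body of B's main loop over conns
def bStep (y : Int) (st : List Int × List (Int × Int)) (c : (Int × Int) × (Int × Int)) :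
    List Int × List (Int × Int) :=
  let r := |c.1.1 - c.2.1| + |c.1.2 - c.2.2| - |c.1.2 - y|
  let lohi := if r < 0 then (c.1.1, c.1.1) else (c.1.1 - r, c.1.1 + r + 1)
  let pieces := st.2.foldl pySubPieces [lohi]
  (st.1 ++ pieces.flatMap (fun pq => PySem.List.pyRange pq.1 pq.2 1), st.2 ++ [lohi])

def get_exclusion_set_in_alt (conns : List ((Int × Int) × (Int × Int))) (y : Int) : List Int :=
  let st := conns.foldl (bStep y) ([], [])
  let bxs : PySem.Set Int :=
    PySem.Set.ofList ((conns.filter (fun c => c.2.2 == y)).map (fun c => c.2.1))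
  PySem.Set.ofList (st.1.filter (fun x => !(PySem.Set.contains bxs x)))

-- ===== PRECONDITION & SPEC =====
def Spec_get_exclusion_set_in (conns : List ((Int × Int) × (Int × Int))) (y : Int) (out : List Int) : Prop := out = get_exclusion_set_in_alt conns y
instance (conns : List ((Int × Int) × (Int × Int))) (y : Int) (out : List Int) : Decidable (Spec_get_exclusion_set_in conns y out) := by unfold Spec_get_exclusion_set_in; infer_instance

-- ===== CLAIM (what is proved, stated in full; the proofs are below) =====
def Claim_equal_get_exclusion_set_in : Prop := ∀ (conns : List ((Int × Int) × (Int × Int))) (y : Int), Dom_get_exclusion_set_in conns y → Spec_get_exclusion_set_in conns y (get_exclusion_set_in conns y)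

-- ===== LEMMAS AND PROOFS =====

-- x is covered by one of the intervals of `cover`
def coveredB (cover : List (Int × Int)) (x : Int) : Bool :=
  cover.any (fun ab => decide (ab.1 ≤ x ∧ x < ab.2))

-- two strictly increasing integer lists with the same members are equal
lemma eq_of_mem_pairwise_lt (l₁ l₂ : List Int)
    (h₁ : l₁.Pairwise (· < ·)) (h₂ : l₂.Pairwise (· < ·))
    (hm : ∀ x, x ∈ l₁ ↔ x ∈ l₂) : l₁ = l₂ := by
  have n₁ : l₁.Nodup := h₁.imp (fun h => ne_of_lt h)
  have n₂ : l₂.Nodup := h₂.imp (fun h => ne_of_lt h)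
  exact List.Perm.eq_of_pairwise (fun a b _ _ hab hba => absurd hab (not_lt_of_gt hba)) h₁ h₂
    ((List.perm_ext_iff_of_nodup n₁ n₂).mpr hm)

-- subtracting one (nonreversed) interval from one piece, as enumerated values
lemma sub_one_piece (p q a b : Int) (hab : a ≤ b) :
    (([(p, min q a), (max p b, q)]).filter (fun pc => decide (pc.1 < pc.2))).flatMap
        (fun pq => PySem.List.pyRange pq.1 pq.2 1)
      = (PySem.List.pyRange p q 1).filter (fun x => !decide (a ≤ x ∧ x < b)) := by
  have step1 : (([(p, min q a), (max p b, q)]).filter (fun pc => decide (pc.1 < pc.2))).flatMap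
      (fun pq => PySem.List.pyRange pq.1 pq.2 1)
      = PySem.List.pyRange p (min q a) 1 ++ PySem.List.pyRange (max p b) q 1 := by
    by_cases h1 : p < min q a <;> by_cases h2 : max p b < q <;> simp [h1, h2]
    · exact PySem.List.pyRange_one_eq_nil (by omega)
    · exact PySem.List.pyRange_one_eq_nil (by omega)
    · exact ⟨PySem.List.pyRange_one_eq_nil (by omega), PySem.List.pyRange_one_eq_nil (by omega)⟩
  rw [step1]
  apply eq_of_mem_pairwise_lt
  · rw [List.pairwise_append]
    refine ⟨PySem.List.pairwise_lt_pyRange_one _ _, PySem.List.pairwise_lt_pyRange_one _ _, ?_⟩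
    intro u hu v hv
    rw [PySem.List.mem_pyRange_one] at hu hv
    omega
  · exact (PySem.List.pairwise_lt_pyRange_one p q).filter _
  · intro x
    simp [PySem.List.mem_pyRange_one, List.mem_filter, List.mem_append]
    omega

-- subtracting every interval of `cover`, as enumerated values
lemma sub_all (cover : List (Int × Int)) (hcov : ∀ ab ∈ cover, ab.1 ≤ ab.2)
    (pieces : List (Int × Int)) :
    (cover.foldl pySubPieces pieces).flatMap (fun pq => PySem.List.pyRange pq.1 pq.2 1)
      = (pieces.flatMap (fun pq => PySem.List.pyRange pq.1 pq.2 1)).filter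
          (fun x => !coveredB cover x) := by
  induction cover generalizing pieces with
  | nil => simp [coveredB]
  | cons ab cs ih =>
    have hab : ab.1 ≤ ab.2 := hcov ab (List.mem_cons_self)
    rw [List.foldl_cons, ih (fun i hi => hcov i (List.mem_cons_of_mem _ hi))]
    have hsub : (pySubPieces pieces ab).flatMap (fun pq => PySem.List.pyRange pq.1 pq.2 1)
        = (pieces.flatMap (fun pq => PySem.List.pyRange pq.1 pq.2 1)).filter
            (fun x => !decide (ab.1 ≤ x ∧ x < ab.2)) := by
      unfold pySubPieces
      rw [List.flatMap_assoc, List.filter_flatMap]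
      simp only [sub_one_piece _ _ ab.1 ab.2 hab]
    rw [hsub, List.filter_filter]
    apply List.filter_congr
    intro x _
    simp [coveredB, List.any_cons, Bool.not_or, Bool.and_comm]

lemma interval_eq (y : Int) (c : (Int × Int) × (Int × Int)) :
    get_exclusion_in c.1 c.2 y
      = (if |c.1.1 - c.2.1| + |c.1.2 - c.2.2| - |c.1.2 - y| < 0 then (c.1.1, c.1.1)
         else (c.1.1 - (|c.1.1 - c.2.1| + |c.1.2 - c.2.2| - |c.1.2 - y|),
               c.1.1 + (|c.1.1 - c.2.1| + |c.1.2 - c.2.2| - |c.1.2 - y|) + 1)) := rfl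

lemma phase1 (y : Int) (conns : List ((Int × Int) × (Int × Int))) :
    ∀ (result : PySem.Set Int) (cover : List (Int × Int)),
      result.Nodup → (∀ x, x ∈ result ↔ coveredB cover x = true) →
      (∀ ab ∈ cover, ab.1 ≤ ab.2) →
      conns.foldl (aUpdate y) result = (conns.foldl (bStep y) (result, cover)).1 ∧
      (conns.foldl (aUpdate y) result).Nodup := by
  induction conns with
  | nil => intro result cover hnd hmem hcov; exact ⟨rfl, hnd⟩
  | cons c cs ih =>
    intro result cover hnd hmem hcov
    have hle : (get_exclusion_in c.1 c.2 y).1 ≤ (get_exclusion_in c.1 c.2 y).2 := by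
      unfold get_exclusion_in
      dsimp only
      split_ifs with h <;> dsimp only <;> omega
    have hstep : bStep y (result, cover) c
        = (aUpdate y result c, cover ++ [get_exclusion_in c.1 c.2 y]) := by
      unfold bStep
      dsimp only
      rw [← interval_eq y c]
      refine Prod.ext ?_ rfl
      unfold aUpdate
      rw [PySem.Set.update_eq_append_filter, PySem.Set.ofList_ofList,
        PySem.Set.ofList_eq_self_of_nodup _ (PySem.List.nodup_pyRange_one _ _),
        sub_all cover hcov [get_exclusion_in c.1 c.2 y]]
      simp only [List.flatMap_cons, List.flatMap_nil, List.append_nil]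
      refine congrArg _ (List.filter_congr ?_)
      intro x _
      rw [Bool.eq_iff_iff]
      simp [hmem x]
    rw [List.foldl_cons, List.foldl_cons, hstep]
    refine ih (aUpdate y result c) (cover ++ [get_exclusion_in c.1 c.2 y])
      (PySem.Set.nodup_update _ _ hnd) ?_ ?_
    · intro x
      simp [aUpdate, PySem.Set.mem_update, PySem.Set.mem_ofList, PySem.List.mem_pyRange_one,
        coveredB, List.any_append, List.any_cons, List.any_nil, hmem x]
    · intro ab hab
      rcases List.mem_append.mp hab with h | h
      · exact hcov ab h
      · simp at h; subst h; exact hle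

lemma phase2 (y : Int) (conns : List ((Int × Int) × (Int × Int))) :
    ∀ (res : List Int), res.Nodup →
      conns.foldl (aRemove y) res
        = res.filter (fun x => !(conns.any (fun c => c.2.2 == y && c.2.1 == x))) := by
  induction conns with
  | nil => intro res hnd; simp
  | cons c cs ih =>
    intro res hnd
    rw [List.foldl_cons]
    by_cases hy : (c.2.2 == y) = true
    · by_cases hin : PySem.Set.contains res c.2.1 = true
      · have hmemb : c.2.1 ∈ res := (PySem.Set.contains_iff res c.2.1).mp hin
        have hrem : aRemove y res c = PySem.Set.discard res c.2.1 := by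
          unfold aRemove
          rw [if_pos (by simp [hy, hmemb])]
        rw [hrem, ih _ (PySem.Set.nodup_discard _ _ hnd)]
        show List.filter _ (List.filter _ res) = _
        rw [List.filter_filter]
        apply List.filter_congr
        intro x _
        rw [Bool.eq_iff_iff]
        simp [hy, List.any_cons]
        aesop
      · have hnin : c.2.1 ∉ res := fun h => hin ((PySem.Set.contains_iff res c.2.1).mpr h)
        have hrem : aRemove y res c = res := by
          unfold aRemove
          rw [if_neg (by simp [hnin])]
        rw [hrem, ih _ hnd]
        apply List.filter_congr
        intro x hx
        rw [Bool.eq_iff_iff]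
        have : c.2.1 ≠ x := by
          intro h
          exact hin (PySem.Set.contains_iff res c.2.1 |>.mpr (h ▸ hx))
        simp [List.any_cons, this]
    · have hrem : aRemove y res c = res := by
        unfold aRemove
        rw [if_neg (by simp [hy])]
      rw [hrem, ih _ hnd]
      apply List.filter_congr
      intro x _
      simp [List.any_cons, hy]

-- ===== VERDICT (by name: the statement is the Claim_ definition above) =====
theorem get_exclusion_set_in_spec : Claim_equal_get_exclusion_set_in := by
  intro conns y _
  unfold Spec_get_exclusion_set_in get_exclusion_set_in get_exclusion_set_in_alt
  obtain ⟨heq, hnd⟩ := phase1 y conns PySem.Set.empty [] (by simp [PySem.Set.empty])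
    (by simp [PySem.Set.empty, coveredB]) (by simp)
  rw [phase2 y conns _ hnd, heq]
  rw [PySem.Set.ofList_eq_self_of_nodup _ (List.Nodup.filter _ (heq ▸ hnd))]
  apply List.filter_congr
  intro x _
  congr 1
  rw [Bool.eq_iff_iff]
  simp [PySem.Set.contains_eq_listContains, PySem.Set.mem_ofList, List.mem_map, List.mem_filter]
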